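-- pv_equiv track=rewrite | github.com/junseng12/Algorithm-Study | MerkleTree/MerkleStateUpdateVerify/merkle_utils.py | generate_merkle_proof
-- ===== SOURCE A (Python) =====
-- def generate_merkle_proof(tree, index):
--     proof = []
--     for level in tree[:-1]:
--         sibling_index = index ^ 1
--         # 🔧 수정: 짝이 없을 경우 자기 자신을 복제한 것으로 처리
--         if sibling_index < len(level):
--             sibling_hash = level[sibling_index]
--         else:
--             sibling_hash = level[index]  # 자기 자신 복제
--
--         proof.append({
--             "hash": sibling_hash,
--             "dir": "left" if index % 2 else "right"
--         })
--
--         index //= 2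
--     return proof
-- ===== SOURCE B (Python) =====
-- def generate_merkle_proof(tree, index):
--     # Recursive decomposition: peel off one level at a time, cons the entry
--     # onto the proof for the rest of the tree; the bottom-level xor trick is
--     # replaced by an explicit parity case split (odd -> left sibling at
--     # index-1, even -> right sibling at index+1, duplicated self if absent).
--     if len(tree) <= 1:
--         return []
--     level = tree[0]
--     if index % 2:
--         entry = {"hash": level[index - 1], "dir": "left"}
--     elif index + 1 < len(level):
--         entry = {"hash": level[index + 1], "dir": "right"}
--     else:
--         entry = {"hash": level[index], "dir": "right"}
--     return [entry] + generate_merkle_proof(tree[1:], index // 2)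
-- ===== Notes on version B (the rewrite author's own statement) =====
-- stated objective: alternative
-- what changed: Replaced A's imperative loop over tree[:-1] with a mutated index and append-accumulated proof list by a recursion on the tree (cons one entry, recurse on tree[1:] with index//2), and replaced the xor-1 sibling computation and its bound-check branch by an explicit parity case split (odd -> level[index-1]/'left', even -> level[index+1] or duplicated self /'right').
import Mathlib
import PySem

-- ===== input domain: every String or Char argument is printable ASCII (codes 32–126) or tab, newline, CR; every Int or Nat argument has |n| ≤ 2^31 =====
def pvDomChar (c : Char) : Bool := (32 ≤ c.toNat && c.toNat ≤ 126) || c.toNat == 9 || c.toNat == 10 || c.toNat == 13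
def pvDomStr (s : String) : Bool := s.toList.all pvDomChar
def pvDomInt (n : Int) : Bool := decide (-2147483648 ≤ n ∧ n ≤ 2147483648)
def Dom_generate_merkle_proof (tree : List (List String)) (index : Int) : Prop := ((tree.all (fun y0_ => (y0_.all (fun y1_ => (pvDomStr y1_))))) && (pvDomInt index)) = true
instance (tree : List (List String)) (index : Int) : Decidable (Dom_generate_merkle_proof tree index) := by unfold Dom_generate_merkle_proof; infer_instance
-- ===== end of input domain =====

-- B replaces A's imperative loop (mutated index, proof.append) by a recursion on the tree that
-- conses each entry, with the xor-1 sibling expanded into an explicit parity case split; same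
-- return value, no speed claim.

-- `x ^ 1` (Python int xor with 1) flips the last bit; exact for every Int (two's complement).
def pvXor1 (x : Int) : Int := if PySem.Int.mod x 2 = 0 then x + 1 else x - 1

-- ===== PORT A =====
-- the `for level in tree[:-1]` loop, threading the accumulated `proof` list and the mutated
-- `index`; Python indexing via pyGet? (`.getD ""` is only reached where Python raises
-- IndexError — excluded by Pre_).
def pvLoopA : List (List String) → List (List (String × String)) → Int → List (List (String × String))
  | [], proof, _ => proof
  | level :: rest, proof, index =>
      let sib := pvXor1 index
      let sibling_hash :=
        if sib < (level.length : Int) then (PySem.List.pyGet? level sib).getD ""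
        else (PySem.List.pyGet? level index).getD ""
      pvLoopA rest
        (proof ++ [[("hash", sibling_hash), ("dir", if PySem.Int.mod index 2 ≠ 0 then "left" else "right")]])
        (PySem.Int.floordiv index 2)

def generate_merkle_proof (tree : List (List String)) (index : Int) : List (List (String × String)) :=
  pvLoopA (PySem.List.slice tree none (some (-1))) [] index

-- ===== PORT B =====
-- Source B's recursion: `len(tree) <= 1 -> []`, else one entry by parity case split, consed onto
-- the recursive call on tree[1:] with index//2.
def generate_merkle_proof_alt : List (List String) → Int → List (List (String × String))
  | [], _ => []
  | [_], _ => []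
  | level :: rest, index =>
      let entry :=
        if PySem.Int.mod index 2 ≠ 0 then
          [("hash", (PySem.List.pyGet? level (index - 1)).getD ""), ("dir", "left")]
        else if index + 1 < (level.length : Int) then
          [("hash", (PySem.List.pyGet? level (index + 1)).getD ""), ("dir", "right")]
        else
          [("hash", (PySem.List.pyGet? level index).getD ""), ("dir", "right")]
      entry :: generate_merkle_proof_alt rest (PySem.Int.floordiv index 2)

-- ===== PRECONDITION & SPEC =====
-- Pre_ excludes exactly the inputs on which Python A raises IndexError: at some level i the
-- index actually used (sib if sib < len, else the running index index>>i) is out of range.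
def Pre_generate_merkle_proof (tree : List (List String)) (index : Int) : Prop :=
  ∀ i ∈ List.range (tree.length - 1),
    let level := (tree[i]?).getD []
    let cur := PySem.Int.floordiv index (2 ^ i)
    let sib := pvXor1 cur
    if sib < (level.length : Int) then PySem.Raise.InRange level.length sib
    else PySem.Raise.InRange level.length cur
instance (tree : List (List String)) (index : Int) : Decidable (Pre_generate_merkle_proof tree index) := by unfold Pre_generate_merkle_proof; infer_instance

def pvWitness_generate_merkle_proof : List (List String) × Int := ([["a", "b"], ["c"]], 1)

def Spec_generate_merkle_proof (tree : List (List String)) (index : Int) (out : List (List (String × String))) : Prop := out = generate_merkle_proof_alt tree index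
instance (tree : List (List String)) (index : Int) (out : List (List (String × String))) : Decidable (Spec_generate_merkle_proof tree index out) := by unfold Spec_generate_merkle_proof; infer_instance

-- ===== CLAIM (what is proved, stated in full; the proofs are below) =====
def Claim_equal_generate_merkle_proof : Prop := ∀ (tree : List (List String)) (index : Int), Dom_generate_merkle_proof tree index → Pre_generate_merkle_proof tree index → Spec_generate_merkle_proof tree index (generate_merkle_proof tree index)

-- ===== LEMMAS AND PROOFS =====

lemma pvLoopA_append (levels : List (List String)) (proof : List (List (String × String)))
    (index : Int) : pvLoopA levels proof index = proof ++ pvLoopA levels [] index := by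
  induction levels generalizing proof index with
  | nil => simp [pvLoopA]
  | cons level rest ih =>
      simp only [pvLoopA]
      rw [ih]
      conv_rhs => rw [ih]
      simp

lemma pyGet?_none_of_ge {α : Type} (xs : List α) (i : Int) (h : (xs.length : Int) ≤ i) :
    PySem.List.pyGet? xs i = none := by
  rw [show i = ((i.toNat : Nat) : Int) by omega, PySem.List.pyGet?_natCast]
  exact List.getElem?_eq_none (by omega)

lemma pvLoopA_dropLast (tree : List (List String)) (index : Int) :
    pvLoopA tree.dropLast [] index = generate_merkle_proof_alt tree index := by
  induction tree generalizing index with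
  | nil => simp [pvLoopA, generate_merkle_proof_alt]
  | cons level rest ih =>
      cases rest with
      | nil => simp [pvLoopA, generate_merkle_proof_alt]
      | cons l2 t2 =>
          rw [List.dropLast_cons₂]
          simp only [pvLoopA]
          rw [pvLoopA_append]
          rw [ih]
          show _ ++ generate_merkle_proof_alt (l2 :: t2) _ =
            generate_merkle_proof_alt (level :: l2 :: t2) index
          simp only [generate_merkle_proof_alt, pvXor1,
            PySem.Int.mod_eq_emod_of_pos (show (0:Int) < 2 by norm_num)]
          by_cases hm : index % 2 = 0
          · simp only [hm, ne_eq, not_true_eq_false, if_false, List.nil_append]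
            by_cases hlt : index + 1 < (level.length : Int)
            · simp [hlt]
            · simp [hlt]
          · simp only [ne_eq, hm, not_false_eq_true, if_true, if_false, List.nil_append]
            by_cases hlt : index - 1 < (level.length : Int)
            · simp [hlt]
            · rw [if_neg hlt, pyGet?_none_of_ge level (index - 1) (by omega),
                  pyGet?_none_of_ge level index (by omega)]
              rfl

-- ===== VERDICT (by name: the statement is the Claim_ definition above) =====
theorem generate_merkle_proof_spec : Claim_equal_generate_merkle_proof := by
  intro tree index _dom _pre
  unfold Spec_generate_merkle_proof generate_merkle_proof
  rw [PySem.List.slice_to_neg_one, pvLoopA_dropLast]
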